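-- pv_equiv track=rewrite | github.com/sylvan-tang/setting | cources/is_num.py | is_num
-- ===== SOURCE A (Python) =====
-- def is_num(num):
--     num_str = str(num)
--     i = 0
--     n = len(num_str)
--     output = True
--     while i < n/2:
--         if num_str[i] != num_str[n-1-i]:
--             output = False
--             break
--         i += 1
--     return output
-- ===== SOURCE B (Python) =====
-- def is_num(num):
--     s = str(num)
--     return s == s[::-1]
-- ===== Notes on version B (the rewrite author's own statement) =====
-- stated objective: idiomatic
-- what changed: Replaced the index-based two-pointer early-exit while loop with the one-line idiom s == s[::-1] (full reversed copy, single equality test).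
import Mathlib
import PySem

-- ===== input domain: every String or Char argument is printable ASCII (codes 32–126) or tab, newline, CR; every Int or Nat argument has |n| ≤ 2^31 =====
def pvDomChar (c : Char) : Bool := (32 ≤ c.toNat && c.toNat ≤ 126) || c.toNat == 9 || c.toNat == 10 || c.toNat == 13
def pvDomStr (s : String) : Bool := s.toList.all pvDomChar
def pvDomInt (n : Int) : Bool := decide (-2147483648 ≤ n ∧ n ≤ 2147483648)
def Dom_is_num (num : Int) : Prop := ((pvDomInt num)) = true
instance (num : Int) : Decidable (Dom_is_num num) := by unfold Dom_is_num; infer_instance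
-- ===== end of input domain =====

-- B replaces A's index-based two-pointer early-exit while loop by the idiom s == s[::-1]
-- (compare the string with its full reversed copy); equivalence of return values is proved.

-- ===== PORT A =====
-- A's while loop: i runs while i < n/2 (real division, i.e. 2*i < n); both indices are
-- always in range there, so the in-range read num_str[j] is ported as getD (exact on
-- every reachable state).
def is_num_loop (s : List Char) (n : Nat) (i : Nat) : Bool :=
  if _h : 2 * i < n then
    if s.getD i ' ' ≠ s.getD (n - 1 - i) ' ' then false
    else is_num_loop s n (i + 1)
  else true
  termination_by n - i

def is_num (num : Int) : Bool :=
  let num_str := (PySem.Int.toStr num).toList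
  is_num_loop num_str num_str.length 0

-- ===== PORT B =====
def is_num_alt (num : Int) : Bool :=
  let s := (PySem.Int.toStr num).toList
  -- s == s[::-1]; PySem.List.slice? s none none (-1) = some s.reverse
  match PySem.List.slice? s none none (-1) with
  | some r => s == r
  | none => false

-- ===== PRECONDITION & SPEC =====
def Spec_is_num (num : Int) (out : Bool) : Prop := out = is_num_alt num
instance (num : Int) (out : Bool) : Decidable (Spec_is_num num out) := by unfold Spec_is_num; infer_instance

-- ===== CLAIM (what is proved, stated in full; the proofs are below) =====
def Claim_equal_is_num : Prop := ∀ (num : Int), Dom_is_num num → Spec_is_num num (is_num num)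

-- ===== LEMMAS AND PROOFS =====

-- The loop from index i succeeds iff all remaining half-range checks succeed.
theorem is_num_loop_eq_true (s : List Char) (i : Nat) :
    is_num_loop s s.length i = true
      ↔ (∀ j, i ≤ j → 2 * j < s.length → s.getD j ' ' = s.getD (s.length - 1 - j) ' ') := by
  rw [is_num_loop]
  split_ifs with h hne
  · simp only [false_iff]
    intro hall
    exact hne (hall i le_rfl h)
  · rw [is_num_loop_eq_true s (i + 1)]
    constructor
    · intro hall j hij hj
      rcases Nat.eq_or_lt_of_le hij with rfl | hlt
      · exact not_not.mp (by simpa using hne)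
      · exact hall j hlt hj
    · intro hall j hij hj
      exact hall j (Nat.le_of_succ_le hij) hj
  · simp only [true_iff]
    intro j hij hj
    omega
  termination_by s.length - i

theorem half_checks_iff_reverse (s : List Char) :
    (∀ j, 0 ≤ j → 2 * j < s.length → s.getD j ' ' = s.getD (s.length - 1 - j) ' ')
      ↔ s = s.reverse := by
  constructor
  · intro h
    apply List.ext_getElem (by simp)
    intro j hj _
    rw [List.getElem_reverse]
    by_cases hhalf : 2 * j < s.length
    · have := h j (Nat.zero_le _) hhalf
      rwa [List.getD_eq_getElem s ' ' hj,
           List.getD_eq_getElem s ' ' (by omega : s.length - 1 - j < s.length)] at this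
    · have hk : 2 * (s.length - 1 - j) < s.length := by omega
      have := h (s.length - 1 - j) (Nat.zero_le _) hk
      have hjk : s.length - 1 - (s.length - 1 - j) = j := by omega
      rw [hjk] at this
      rw [List.getD_eq_getElem s ' ' (by omega : s.length - 1 - j < s.length),
          List.getD_eq_getElem s ' ' hj] at this
      exact this.symm
  · intro h j _ hj
    have hjlen : j < s.length := by omega
    have hklen : s.length - 1 - j < s.length := by omega
    calc s.getD j ' ' = s.reverse.getD j ' ' := by rw [← h]
      _ = s.getD (s.length - 1 - j) ' ' := by
          rw [List.getD_eq_getElem s.reverse ' ' (by simpa using hjlen),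
              List.getElem_reverse, List.getD_eq_getElem s ' ' hklen]

-- ===== VERDICT (by name: the statement is the Claim_ definition above) =====
theorem is_num_spec : Claim_equal_is_num := by
  intro num _
  unfold Spec_is_num
  show is_num_loop ((PySem.Int.toStr num).toList) ((PySem.Int.toStr num).toList).length 0
      = (match PySem.List.slice? ((PySem.Int.toStr num).toList) none none (-1) with
         | some r => (PySem.Int.toStr num).toList == r
         | none => false)
  rw [PySem.List.slice?_none_none_neg_one]
  rw [Bool.eq_iff_iff, is_num_loop_eq_true, half_checks_iff_reverse]
  simp
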